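-- pv_equiv track=rewrite | github.com/alex-stephens/aoc2023 | 07/b.py | tie_break_score
-- ===== SOURCE A (Python) =====
-- CARDS = "J23456789TQKA"
--
-- def tie_break_score(h):
--     """
--     Returns a tie breaker score for a hand.
--     """
--     BASE = 100
--     b = 1
--     score = 0
--     for c in h[::-1]:
--         score += CARDS.index(c) * b
--         b *= BASE
--
--     return score
-- ===== SOURCE B (Python) =====
-- CARDS = "J23456789TQKA"
--
-- def tie_break_score(h):
--     """
--     Returns a tie breaker score for a hand.
--     """
--     score = 0
--     for c in h:
--         score = score * 100 + CARDS.index(c)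
--     return score
-- ===== Notes on version B (the rewrite author's own statement) =====
-- stated objective: simpler
-- what changed: Horner's method over the hand in forward order (score = score*100 + digit), removing the explicit place-value variable b and the reversal of h.
import Mathlib
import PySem

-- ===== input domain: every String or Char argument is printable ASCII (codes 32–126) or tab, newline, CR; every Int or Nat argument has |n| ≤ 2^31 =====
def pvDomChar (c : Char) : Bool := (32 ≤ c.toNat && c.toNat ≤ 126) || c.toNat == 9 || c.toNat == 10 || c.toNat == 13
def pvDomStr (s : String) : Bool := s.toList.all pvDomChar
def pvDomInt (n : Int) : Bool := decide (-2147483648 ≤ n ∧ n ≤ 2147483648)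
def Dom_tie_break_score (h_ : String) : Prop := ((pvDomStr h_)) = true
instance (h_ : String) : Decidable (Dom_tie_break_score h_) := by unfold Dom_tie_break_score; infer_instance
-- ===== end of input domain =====

-- B replaces A's reversed loop with an explicit place-value variable by Horner's method in
-- forward order (simpler, same cost); proved equal on all hands whose characters occur in CARDS.


-- CARDS = "J23456789TQKA"
def pvCards : List Char := "J23456789TQKA".toList

-- CARDS.index(c): raises ValueError when c is absent (excluded by Pre_); exact on members.
def pvCardIdx (c : Char) : Int :=
  match PySem.List.index? pvCards c with
  | some k => (k : Int)
  | none => 0  -- unreachable under Pre_ (ValueError in Python)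

-- ===== PORT A =====
-- loop 'for c in h[::-1]' (h[::-1] is reverse: PySem.Str.slice?_none_none_neg_one) with state (b, score)
def tie_break_score (h_ : String) : Int :=
  (h_.toList.reverse.foldl (fun (st : Int × Int) c => (st.1 * 100, st.2 + pvCardIdx c * st.1)) (1, 0)).2

-- ===== PORT B =====
-- Horner, forward order
def tie_break_score_alt (h_ : String) : Int :=
  h_.toList.foldl (fun score c => score * 100 + pvCardIdx c) 0

-- ===== PRECONDITION & SPEC =====
-- Pre_ excludes exactly the hands containing a character outside CARDS, on which both
-- Pythons raise ValueError (CARDS.index).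
def Pre_tie_break_score (h_ : String) : Prop := h_.toList.all (fun c => pvCards.contains c) = true
instance (h_ : String) : Decidable (Pre_tie_break_score h_) := by unfold Pre_tie_break_score; infer_instance
def pvWitness_tie_break_score : String := "T55J5"

def Spec_tie_break_score (h_ : String) (out : Int) : Prop := out = tie_break_score_alt h_
instance (h_ : String) (out : Int) : Decidable (Spec_tie_break_score h_ out) := by unfold Spec_tie_break_score; infer_instance

-- ===== CLAIM (what is proved, stated in full; the proofs are below) =====
def Claim_equal_tie_break_score : Prop := ∀ (h_ : String), Dom_tie_break_score h_ → Pre_tie_break_score h_ → Spec_tie_break_score h_ (tie_break_score h_)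

-- ===== LEMMAS AND PROOFS =====

-- Horner's fold from an arbitrary accumulator shifts by a power of the base.
theorem pv_horner_shift (l : List Char) (a : Int) :
    l.foldl (fun score c => score * 100 + pvCardIdx c) a
      = a * 100 ^ l.length + l.foldl (fun score c => score * 100 + pvCardIdx c) 0 := by
  induction l generalizing a with
  | nil => simp
  | cons x xs ih =>
    simp only [List.foldl_cons, List.length_cons]
    rw [ih (a * 100 + pvCardIdx x), ih (0 * 100 + pvCardIdx x)]
    ring

-- A's reversed fold with state (b, score) computes (b·100^n, s + b·Horner l).
theorem pv_rev_fold (l : List Char) (b s : Int) :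
    l.reverse.foldl (fun (st : Int × Int) c => (st.1 * 100, st.2 + pvCardIdx c * st.1)) (b, s)
      = (b * 100 ^ l.length,
         s + b * l.foldl (fun score c => score * 100 + pvCardIdx c) 0) := by
  induction l generalizing b s with
  | nil => simp
  | cons x xs ih =>
    simp only [List.reverse_cons, List.foldl_append, List.foldl_cons, List.foldl_nil,
      List.length_cons, ih]
    rw [pv_horner_shift xs (0 * 100 + pvCardIdx x)]
    exact Prod.ext (by ring) (by ring)

-- ===== VERDICT (by name: the statement is the Claim_ definition above) =====
theorem tie_break_score_spec : Claim_equal_tie_break_score := by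
  intro h_ _ _
  unfold Spec_tie_break_score tie_break_score tie_break_score_alt
  rw [pv_rev_fold]
  ring
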